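-- pv_equiv track=rewrite | github.com/tlijkkkk/mark_v | leetcode-practice/leetcode_practice/string/natural_order_string_compare.py | natural_order_string_compare
-- ===== SOURCE A (Python) =====
-- def natural_order_string_compare(str1: str, str2: str) -> int:
--     i, j = 0, 0
--
--     while i < len(str1) and j < len(str2):
--         if str1[i].isdigit() and str2[j].isdigit():
--             tmp = ""
--             while i < len(str1) and str1[i].isdigit():
--                 tmp += str1[i]
--                 i += 1
--
--             tmp2 = ""
--             while j < len(str2) and str2[j].isdigit():
--                 tmp2 += str2[j]
--                 j += 1
--
--             if int(tmp) < int(tmp2):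
--                 return -1
--             elif int(tmp) > int(tmp2):
--                 return 1
--
--             continue
--
--         if str1[i].isalpha() and str2[j].isalpha():
--             if str1[i] < str2[j]:
--                 return -11
--             elif str1[i] > str2[j]:
--                 return 11
--         elif str1[i].isdigit():
--             return -111
--         else:
--             return 111
--
--         i += 1
--         j += 1
--
--     if i == len(str1) and j == len(str2):
--         return 0
--     elif i == len(str1):
--         return -1111
--     else:
--         return 1111
-- ===== SOURCE B (Python) =====
-- def natural_order_string_compare(str1: str, str2: str) -> int:
--     def tokenize(s):
--         toks = []
--         i, n = 0, len(s)
--         while i < n: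
--             if s[i].isdigit():
--                 j = i
--                 while j < n and s[j].isdigit():
--                     j += 1
--                 toks.append(s[i:j])
--                 i = j
--             else:
--                 toks.append(s[i])
--                 i += 1
--         return toks
--
--     t1, t2 = tokenize(str1), tokenize(str2)
--     for a, b in zip(t1, t2):
--         if a.isdigit() and b.isdigit():
--             va, vb = int(a), int(b)
--             if va < vb:
--                 return -1
--             if va > vb:
--                 return 1
--         elif a.isalpha() and b.isalpha():
--             if a < b:
--                 return -11
--             if a > b:
--                 return 11
--         elif a.isdigit():
--             return -111
--         else:
--             return 111
--     if len(t1) == len(t2):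
--         return 0
--     return -1111 if len(t1) < len(t2) else 1111
-- ===== Notes on version B (the rewrite author's own statement) =====
-- stated objective: alternative
-- what changed: A walks both strings with two cursors and re-classifies characters in place; B first tokenizes each string in one pass (digit runs become numeric tokens, every other character a single-char token) and then compares the two token lists position by position, with the length comparison replacing A's leftover-cursor check.
import Mathlib
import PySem

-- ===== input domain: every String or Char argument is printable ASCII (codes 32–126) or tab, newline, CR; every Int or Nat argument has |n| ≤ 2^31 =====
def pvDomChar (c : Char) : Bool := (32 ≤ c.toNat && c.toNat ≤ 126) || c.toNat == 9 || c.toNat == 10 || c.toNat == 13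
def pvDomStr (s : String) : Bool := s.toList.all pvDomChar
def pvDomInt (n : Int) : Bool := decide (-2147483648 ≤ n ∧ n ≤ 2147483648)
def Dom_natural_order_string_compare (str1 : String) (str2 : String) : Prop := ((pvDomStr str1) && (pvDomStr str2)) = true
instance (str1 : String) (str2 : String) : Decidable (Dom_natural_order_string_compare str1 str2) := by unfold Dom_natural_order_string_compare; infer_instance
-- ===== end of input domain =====

-- B re-implements the index-walking comparator by a tokenize-then-compare pass (different decomposition,
-- same cost); return values are identical, including all sentinel magnitudes.

-- ===== PORT A =====
-- A's inner while loops: collect the maximal digit run (tmp) and return it with the remaining suffix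
def pvTakeDigits : List Char → List Char × List Char
  | [] => ([], [])
  | c :: rest =>
    if PySem.Chars.isdigit c then
      let p := pvTakeDigits rest
      (c :: p.1, p.2)
    else ([], c :: rest)

theorem pvTakeDigits_snd_length_le (l : List Char) : (pvTakeDigits l).2.length ≤ l.length := by
  induction l with
  | nil => simp [pvTakeDigits]
  | cons c rest ih =>
    simp only [pvTakeDigits]
    split
    · exact Nat.le_succ_of_le ih
    · simp

-- A's outer while loop over the two cursor positions, carried as the remaining suffixes
def pvALoop : List Char → List Char → Int
  | c1 :: r1, c2 :: r2 =>
    if h : PySem.Chars.isdigit c1 && PySem.Chars.isdigit c2 then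
      let p1 := pvTakeDigits (c1 :: r1)
      let p2 := pvTakeDigits (c2 :: r2)
      -- int(tmp): tmp is a nonempty run of ASCII digits here, so int() returns (ofChars? is some)
      let n1 := (PySem.Int.ofChars? p1.1).getD 0
      let n2 := (PySem.Int.ofChars? p2.1).getD 0
      if n1 < n2 then -1 else if n2 < n1 then 1 else pvALoop p1.2 p2.2
    else if PySem.Chars.isalpha c1 && PySem.Chars.isalpha c2 then
      if c1 < c2 then -11 else if c2 < c1 then 11 else pvALoop r1 r2
    else if PySem.Chars.isdigit c1 then -111 else 111
  | [], [] => 0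
  | [], _ :: _ => -1111
  | _ :: _, [] => 1111
termination_by l1 l2 => l1.length + l2.length
decreasing_by
  · have h1 : PySem.Chars.isdigit c1 = true := (Bool.and_eq_true _ _ |>.mp h).1
    have h2 : PySem.Chars.isdigit c2 = true := (Bool.and_eq_true _ _ |>.mp h).2
    have e1 : (pvTakeDigits (c1 :: r1)).2 = (pvTakeDigits r1).2 := by simp [pvTakeDigits, h1]
    have e2 : (pvTakeDigits (c2 :: r2)).2 = (pvTakeDigits r2).2 := by simp [pvTakeDigits, h2]
    have l1 := pvTakeDigits_snd_length_le r1
    have l2 := pvTakeDigits_snd_length_le r2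
    simp only [e1, e2, List.length_cons]
    omega
  · simp only [List.length_cons]; omega

def natural_order_string_compare (str1 : String) (str2 : String) : Int :=
  pvALoop str1.toList str2.toList

-- ===== PORT B =====
-- B's tokenizer inner scan: the maximal digit run after the current position, with the rest
def pvSpanDigits : List Char → List Char × List Char
  | [] => ([], [])
  | c :: rest =>
    if PySem.Chars.isdigit c then
      let p := pvSpanDigits rest
      (c :: p.1, p.2)
    else ([], c :: rest)

theorem pvSpanDigits_snd_length_le (l : List Char) : (pvSpanDigits l).2.length ≤ l.length := by
  induction l with
  | nil => simp [pvSpanDigits]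
  | cons c rest ih =>
    simp only [pvSpanDigits]
    split
    · exact Nat.le_succ_of_le ih
    · simp

-- one scan: digit runs become one token, every other character its own single-char token
def pvTokenize : List Char → List (List Char)
  | [] => []
  | c :: rest =>
    if PySem.Chars.isdigit c then
      (c :: (pvSpanDigits rest).1) :: pvTokenize (pvSpanDigits rest).2
    else [c] :: pvTokenize rest
termination_by l => l.length
decreasing_by
  · have := pvSpanDigits_snd_length_le rest
    simp only [List.length_cons]; omega
  · simp only [List.length_cons]; omega

-- B's zip loop over the two token lists, then the length comparison
def pvCmpTokens : List (List Char) → List (List Char) → Int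
  | a :: r1, b :: r2 =>
    if PySem.Chars.strIsdigit a && PySem.Chars.strIsdigit b then
      let va := (PySem.Int.ofChars? a).getD 0
      let vb := (PySem.Int.ofChars? b).getD 0
      if va < vb then -1 else if vb < va then 1 else pvCmpTokens r1 r2
    else if PySem.Chars.strIsalpha a && PySem.Chars.strIsalpha b then
      if PySem.Chars.strLt a b then -11 else if PySem.Chars.strLt b a then 11 else pvCmpTokens r1 r2
    else if PySem.Chars.strIsdigit a then -111 else 111
  | [], [] => 0
  | [], _ :: _ => -1111
  | _ :: _, [] => 1111

def natural_order_string_compare_alt (str1 : String) (str2 : String) : Int :=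
  pvCmpTokens (pvTokenize str1.toList) (pvTokenize str2.toList)

-- ===== PRECONDITION & SPEC =====
def Spec_natural_order_string_compare (str1 : String) (str2 : String) (out : Int) : Prop := out = natural_order_string_compare_alt str1 str2
instance (str1 : String) (str2 : String) (out : Int) : Decidable (Spec_natural_order_string_compare str1 str2 out) := by unfold Spec_natural_order_string_compare; infer_instance

-- ===== CLAIM (what is proved, stated in full; the proofs are below) =====
def Claim_equal_natural_order_string_compare : Prop := ∀ (str1 : String) (str2 : String), Dom_natural_order_string_compare str1 str2 → Spec_natural_order_string_compare str1 str2 (natural_order_string_compare str1 str2)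

-- ===== LEMMAS AND PROOFS =====

theorem pvSpanDigits_eq_takeDigits (l : List Char) : pvSpanDigits l = pvTakeDigits l := by
  induction l with
  | nil => rfl
  | cons c rest ih => simp only [pvSpanDigits, pvTakeDigits, ih]

theorem pvTakeDigits_fst_all (l : List Char) :
    ∀ c ∈ (pvTakeDigits l).1, PySem.Chars.isdigit c = true := by
  induction l with
  | nil => simp [pvTakeDigits]
  | cons c rest ih =>
    simp only [pvTakeDigits]
    split
    · intro d hd
      rcases List.mem_cons.mp hd with h | h
      · subst h; assumption
      · exact ih d h
    · simp

theorem strIsdigit_digit_token {c : Char} (l : List Char) (h : PySem.Chars.isdigit c = true) :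
    PySem.Chars.strIsdigit (c :: (pvTakeDigits l).1) = true := by
  simp only [PySem.Chars.strIsdigit, List.isEmpty_cons, List.all_cons, h, Bool.true_and,
    Bool.not_false, List.all_eq_true]
  exact pvTakeDigits_fst_all l

theorem digit_not_alpha {c : Char} (h : PySem.Chars.isdigit c = true) :
    PySem.Chars.isalpha c = false := by
  simp only [PySem.Chars.isdigit, Bool.and_eq_true, decide_eq_true_eq] at h
  simp only [PySem.Chars.isalpha, PySem.Chars.isupper, PySem.Chars.islower, Bool.or_eq_false_iff,
    Bool.and_eq_false_iff, decide_eq_false_iff_not, not_le]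
  constructor
  · by_cases hle : 'A' ≤ c
    · exact absurd (le_trans hle h.2) (by decide)
    · left; exact lt_of_not_ge hle
  · by_cases hle : 'a' ≤ c
    · exact absurd (le_trans hle h.2) (by decide)
    · left; exact lt_of_not_ge hle

theorem alpha_not_digit {c : Char} (h : PySem.Chars.isalpha c = true) :
    PySem.Chars.isdigit c = false := by
  by_contra hc
  rw [digit_not_alpha (by simpa using hc)] at h
  cases h

theorem strIsdigit_singleton (c : Char) :
    PySem.Chars.strIsdigit [c] = PySem.Chars.isdigit c := by
  simp [PySem.Chars.strIsdigit]

theorem strIsalpha_singleton (c : Char) :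
    PySem.Chars.strIsalpha [c] = PySem.Chars.isalpha c := by
  simp [PySem.Chars.strIsalpha]

theorem strLt_singleton (a b : Char) : PySem.Chars.strLt [a] [b] = decide (a < b) := by
  simp only [PySem.Chars.strLt, decide_eq_decide]
  constructor
  · intro h
    cases h with
    | rel h => exact h
    | cons h => cases h
  · intro h; exact List.Lex.rel h

theorem pvTokenize_cons (c : Char) (r : List Char) :
    ∃ t ts, pvTokenize (c :: r) = t :: ts := by
  rw [pvTokenize]
  split
  · exact ⟨_, _, rfl⟩
  · exact ⟨_, _, rfl⟩

theorem pvMain : ∀ (n : Nat) (l1 l2 : List Char), l1.length + l2.length ≤ n →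
    pvALoop l1 l2 = pvCmpTokens (pvTokenize l1) (pvTokenize l2) := by
  intro n
  induction n with
  | zero =>
    intro l1 l2 hlen
    have h1 : l1 = [] := List.eq_nil_of_length_eq_zero (by omega)
    have h2 : l2 = [] := List.eq_nil_of_length_eq_zero (by omega)
    subst h1; subst h2
    simp [pvALoop, pvTokenize, pvCmpTokens]
  | succ n ih =>
    intro l1 l2 hlen
    match l1, l2 with
    | [], [] => simp [pvALoop, pvTokenize, pvCmpTokens]
    | [], c :: r =>
      obtain ⟨t, ts, ht⟩ := pvTokenize_cons c r
      simp [pvALoop, pvTokenize, ht, pvCmpTokens]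
    | c :: r, [] =>
      obtain ⟨t, ts, ht⟩ := pvTokenize_cons c r
      simp [pvALoop, pvTokenize, ht, pvCmpTokens]
    | c1 :: r1, c2 :: r2 =>
      rw [pvALoop]
      by_cases hd : (PySem.Chars.isdigit c1 && PySem.Chars.isdigit c2) = true
      · have h1 : PySem.Chars.isdigit c1 = true := (Bool.and_eq_true _ _ |>.mp hd).1
        have h2 : PySem.Chars.isdigit c2 = true := (Bool.and_eq_true _ _ |>.mp hd).2
        have t1 : pvTokenize (c1 :: r1) =
            (c1 :: (pvTakeDigits r1).1) :: pvTokenize (pvTakeDigits r1).2 := by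
          rw [pvTokenize]; simp [h1, pvSpanDigits_eq_takeDigits]
        have t2 : pvTokenize (c2 :: r2) =
            (c2 :: (pvTakeDigits r2).1) :: pvTokenize (pvTakeDigits r2).2 := by
          rw [pvTokenize]; simp [h2, pvSpanDigits_eq_takeDigits]
        have e1 : pvTakeDigits (c1 :: r1) = (c1 :: (pvTakeDigits r1).1, (pvTakeDigits r1).2) := by
          simp [pvTakeDigits, h1]
        have e2 : pvTakeDigits (c2 :: r2) = (c2 :: (pvTakeDigits r2).1, (pvTakeDigits r2).2) := by
          simp [pvTakeDigits, h2]
        rw [dif_pos hd, t1, t2, pvCmpTokens]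
        simp only [e1, e2, strIsdigit_digit_token r1 h1, strIsdigit_digit_token r2 h2,
          Bool.and_self, if_true]
        have hrec : pvALoop (pvTakeDigits r1).2 (pvTakeDigits r2).2 =
            pvCmpTokens (pvTokenize (pvTakeDigits r1).2) (pvTokenize (pvTakeDigits r2).2) := by
          apply ih
          have := pvTakeDigits_snd_length_le r1
          have := pvTakeDigits_snd_length_le r2
          simp only [List.length_cons] at hlen
          omega
        rw [hrec]
      · rw [dif_neg hd]
        by_cases ha : (PySem.Chars.isalpha c1 && PySem.Chars.isalpha c2) = true
        · have a1 : PySem.Chars.isalpha c1 = true := (Bool.and_eq_true _ _ |>.mp ha).1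
          have a2 : PySem.Chars.isalpha c2 = true := (Bool.and_eq_true _ _ |>.mp ha).2
          have nd1 := alpha_not_digit a1
          have nd2 := alpha_not_digit a2
          have t1 : pvTokenize (c1 :: r1) = [c1] :: pvTokenize r1 := by
            rw [pvTokenize]; simp [nd1]
          have t2 : pvTokenize (c2 :: r2) = [c2] :: pvTokenize r2 := by
            rw [pvTokenize]; simp [nd2]
          rw [t1, t2, pvCmpTokens]
          simp only [strIsdigit_singleton, strIsalpha_singleton, nd1, nd2, a1, a2,
            Bool.and_self, Bool.false_eq_true, if_false, if_true, strLt_singleton]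
          have hrec : pvALoop r1 r2 = pvCmpTokens (pvTokenize r1) (pvTokenize r2) := by
            apply ih
            simp only [List.length_cons] at hlen
            omega
          by_cases hlt : c1 < c2
          · simp [hlt]
          · by_cases hgt : c2 < c1
            · simp [hlt, hgt]
            · simp [hlt, hgt, hrec]
        · simp only [ha, Bool.false_eq_true, if_false]
          by_cases h1 : PySem.Chars.isdigit c1 = true
          · -- A returns -111; c2 is not a digit
            have h2 : PySem.Chars.isdigit c2 = false := by
              by_contra hc
              exact hd (by simp [h1, eq_true_of_ne_false hc])
            have t1 : pvTokenize (c1 :: r1) =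
                (c1 :: (pvTakeDigits r1).1) :: pvTokenize (pvTakeDigits r1).2 := by
              rw [pvTokenize]; simp [h1, pvSpanDigits_eq_takeDigits]
            have t2 : pvTokenize (c2 :: r2) = [c2] :: pvTokenize r2 := by
              rw [pvTokenize]; simp [h2]
            rw [t1, t2, pvCmpTokens]
            have na1 : PySem.Chars.strIsalpha (c1 :: (pvTakeDigits r1).1) = false := by
              simp [PySem.Chars.strIsalpha, digit_not_alpha h1]
            simp [strIsdigit_singleton, h1, h2, na1, strIsdigit_digit_token r1 h1]
          · -- A returns 111
            have h1' : PySem.Chars.isdigit c1 = false := by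
              exact Bool.eq_false_iff.mpr h1
            have t1 : pvTokenize (c1 :: r1) = [c1] :: pvTokenize r1 := by
              rw [pvTokenize]; simp [h1']
            by_cases h2 : PySem.Chars.isdigit c2 = true
            · have t2 : pvTokenize (c2 :: r2) =
                  (c2 :: (pvTakeDigits r2).1) :: pvTokenize (pvTakeDigits r2).2 := by
                rw [pvTokenize]; simp [h2, pvSpanDigits_eq_takeDigits]
              have na2 : PySem.Chars.strIsalpha (c2 :: (pvTakeDigits r2).1) = false := by
                simp [PySem.Chars.strIsalpha, digit_not_alpha h2]
              rw [t1, t2, pvCmpTokens]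
              simp [strIsdigit_singleton, strIsalpha_singleton, h1', na2]
            · have h2' : PySem.Chars.isdigit c2 = false := Bool.eq_false_iff.mpr h2
              have t2 : pvTokenize (c2 :: r2) = [c2] :: pvTokenize r2 := by
                rw [pvTokenize]; simp [h2']
              rw [t1, t2, pvCmpTokens]
              have hna : (PySem.Chars.isalpha c1 && PySem.Chars.isalpha c2) = false :=
                Bool.eq_false_iff.mpr ha
              simp [strIsdigit_singleton, strIsalpha_singleton, h1', h2', hna]

-- ===== VERDICT (by name: the statement is the Claim_ definition above) =====
theorem natural_order_string_compare_spec : Claim_equal_natural_order_string_compare := by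
  intro str1 str2 _hdom
  unfold Spec_natural_order_string_compare natural_order_string_compare
    natural_order_string_compare_alt
  exact pvMain (str1.toList.length + str2.toList.length) _ _ (le_refl _)
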